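-- pv_equiv track=rewrite | github.com/neuropix-project/Allpix2ClusteringExample | ClusteringAlgo.py | connected_cluster
-- ===== SOURCE A (Python) =====
-- def connected_cluster(points):
--
--     """Cluster integer (x, y) points by 4-neighbor grid connectivity.
--
--     Assumes points are pixel indices (integers). Two pixels belong to the
--     same cluster if they are connected by steps of (±1, 0) or (0, ±1).
--
--     Parameters
--     ----------
--     points : list of (x, y)
--
--     Returns
--     -------
--     cluster_labels : list[int]
--         Cluster assignment per point.
--     n_clusters : int
--         Number of clusters found.
--     """
--     # Map from coordinate to list of point indices (in case of duplicates)
--     coord_to_indices = {}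
--     for idx, (x, y) in enumerate(points):
--         coord_to_indices.setdefault((int(x), int(y)), []).append(idx)
--
--     visited = set()
--     cluster_labels = [-1] * len(points)
--     cluster_id = 0
--
--     # 4-neighbor offsets
--     neighbors = [(1, 0), (-1, 0), (0, 1), (0, -1)]
--
--     for coord, indices in coord_to_indices.items():
--         if coord in visited:
--             continue
--
--         # BFS/DFS from this coordinate
--         stack = [coord]
--         visited.add(coord)
--
--         # Assign all points at this coordinate to current cluster
--         for idx in indices:
--             cluster_labels[idx] = cluster_id
--
--         while stack:
--             cx, cy = stack.pop()
--             for dx, dy in neighbors: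
--                 nx, ny = cx + dx, cy + dy
--                 ncoord = (nx, ny)
--                 if ncoord in coord_to_indices and ncoord not in visited:
--                     visited.add(ncoord)
--                     stack.append(ncoord)
--                     for idx in coord_to_indices[ncoord]:
--                         cluster_labels[idx] = cluster_id
--
--         cluster_id += 1
--
--     return cluster_labels, cluster_id
-- ===== SOURCE B (Python) =====
-- def connected_cluster(points):
--     """Cluster integer (x, y) points by 4-neighbor grid connectivity.
--
--     Same result as the stack-DFS version, but each cluster is grown by
--     level-wise set saturation (repeatedly adding all unvisited neighbor
--     coordinates of the current component until it stops growing), and the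
--     labels of a cluster are written in one pass after the component is known.
--     """
--     coord_to_indices = {}
--     for idx, (x, y) in enumerate(points):
--         coord_to_indices.setdefault((int(x), int(y)), []).append(idx)
--
--     visited = set()
--     cluster_labels = [-1] * len(points)
--     n_clusters = 0
--
--     for coord in coord_to_indices:
--         if coord in visited:
--             continue
--         # Grow the whole component of `coord` by saturation.
--         comp = {coord}
--         for _ in range(len(coord_to_indices)):
--             grown = set(comp)
--             for (cx, cy) in comp:
--                 for ncoord in ((cx + 1, cy), (cx - 1, cy), (cx, cy + 1), (cx, cy - 1)):
--                     if ncoord in coord_to_indices and ncoord not in visited: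
--                         grown.add(ncoord)
--             if len(grown) == len(comp):
--                 break
--             comp = grown
--         visited |= comp
--         for c in comp:
--             for idx in coord_to_indices[c]:
--                 cluster_labels[idx] = n_clusters
--         n_clusters += 1
--
--     return cluster_labels, n_clusters
-- ===== Notes on version B (the rewrite author's own statement) =====
-- stated objective: alternative
-- what changed: The stack-based DFS that labels pixels one at a time as they are discovered is replaced by level-wise set saturation: each cluster is grown as a whole set by repeatedly adding all unvisited neighbor coordinates until a fixpoint, and the cluster's labels are written in a single pass afterwards.
import Mathlib
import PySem

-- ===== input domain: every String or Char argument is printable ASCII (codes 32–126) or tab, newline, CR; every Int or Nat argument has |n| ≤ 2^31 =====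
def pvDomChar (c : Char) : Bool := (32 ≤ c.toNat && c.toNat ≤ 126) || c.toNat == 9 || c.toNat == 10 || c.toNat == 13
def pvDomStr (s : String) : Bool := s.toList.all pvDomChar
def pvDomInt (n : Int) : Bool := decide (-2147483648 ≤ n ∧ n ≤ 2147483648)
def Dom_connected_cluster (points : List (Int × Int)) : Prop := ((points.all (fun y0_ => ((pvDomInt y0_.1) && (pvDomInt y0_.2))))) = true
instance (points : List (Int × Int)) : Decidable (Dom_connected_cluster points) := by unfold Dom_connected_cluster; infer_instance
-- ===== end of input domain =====

-- B replaces the stack-based DFS (labelling pixels as discovered) by level-wise set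
-- saturation growing each component to a fixpoint, labelling it in one pass afterwards
-- (objective: alternative algorithm, no speed claim).

-- ===== PORT A =====

-- coord_to_indices built by setdefault(...).append(idx)
def ccDictA (points : List (Int × Int)) : PySem.Dict (Int × Int) (List Int) :=
  (PySem.List.enumerate points 0).foldl
    (fun d p => d.modify (p.2.1, p.2.2) [] (fun l => l ++ [p.1])) PySem.Dict.empty

-- neighbors = [(1, 0), (-1, 0), (0, 1), (0, -1)]
def ccOffsets : List (Int × Int) := [(1, 0), (-1, 0), (0, 1), (0, -1)]

-- for idx in indices: cluster_labels[idx] = cluster_id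
def ccWriteA (idxs : List Int) (cid : Int) (lab : List Int) : List Int :=
  idxs.foldl (fun L idx => PySem.List.pySetD L idx cid) lab

-- the body of `for dx, dy in neighbors: ...` for the popped coordinate c
def ccNbrA (m : PySem.Dict (Int × Int) (List Int)) (cid : Int) (c : Int × Int)
    (ds : List (Int × Int))
    (st : PySem.Set (Int × Int) × List (Int × Int) × List Int) :
    PySem.Set (Int × Int) × List (Int × Int) × List Int :=
  ds.foldl
    (fun st d =>
      let n : Int × Int := (c.1 + d.1, c.2 + d.2)
      if m.contains n && !(PySem.Set.contains st.1 n) then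
        (PySem.Set.add st.1 n, st.2.1 ++ [n], ccWriteA (m.getD n []) cid st.2.2)
      else st) st

-- `while stack:` — fuel-bounded transcription of the while loop (fuel only makes it
-- total; dfs_measure below shows the fuel used by the port always suffices)
def ccDfsA (m : PySem.Dict (Int × Int) (List Int)) (cid : Int) :
    Nat → PySem.Set (Int × Int) × List (Int × Int) × List Int →
    PySem.Set (Int × Int) × List Int
  | 0, st => (st.1, st.2.2)
  | fuel + 1, st =>
    if h : st.2.1 = [] then (st.1, st.2.2)
    else
      let c := st.2.1.getLast h
      ccDfsA m cid fuel (ccNbrA m cid c ccOffsets (st.1, st.2.1.dropLast, st.2.2))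

-- one iteration of `for coord, indices in coord_to_indices.items():`
def ccOuterA (m : PySem.Dict (Int × Int) (List Int))
    (st : PySem.Set (Int × Int) × List Int × Int) (ci : (Int × Int) × List Int) :
    PySem.Set (Int × Int) × List Int × Int :=
  if PySem.Set.contains st.1 ci.1 then st
  else
    let vis := PySem.Set.add st.1 ci.1
    let lab := ccWriteA ci.2 st.2.2 st.2.1
    let r := ccDfsA m st.2.2 (5 * m.size + 5) (vis, [ci.1], lab)
    (r.1, r.2, st.2.2 + 1)

def connected_cluster (points : List (Int × Int)) : List Int × Int :=
  let m := ccDictA points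
  let st := m.items.foldl (ccOuterA m)
    (PySem.Set.empty, List.replicate points.length (-1), 0)
  (st.2.1, st.2.2)

-- ===== PORT B =====

def ccDictB (points : List (Int × Int)) : PySem.Dict (Int × Int) (List Int) :=
  (PySem.List.enumerate points 0).foldl
    (fun d p => d.modify (p.2.1, p.2.2) [] (fun l => l ++ [p.1])) PySem.Dict.empty

-- for idx in coord_to_indices[c]: cluster_labels[idx] = n_clusters
def ccWriteB (idxs : List Int) (cid : Int) (lab : List Int) : List Int :=
  idxs.foldl (fun L idx => PySem.List.pySetD L idx cid) lab

-- one growth step: grown = set(comp) plus every unvisited neighbour coordinate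
def ccGrowB (m : PySem.Dict (Int × Int) (List Int)) (vis : PySem.Set (Int × Int))
    (comp : PySem.Set (Int × Int)) : PySem.Set (Int × Int) :=
  comp.foldl
    (fun g c =>
      [(c.1 + 1, c.2), (c.1 - 1, c.2), (c.1, c.2 + 1), (c.1, c.2 - 1)].foldl
        (fun g n =>
          if m.contains n && !(PySem.Set.contains vis n) then PySem.Set.add g n else g)
        g)
    (PySem.Set.ofList comp)

-- `for _ in range(len(coord_to_indices)): ... if len(grown) == len(comp): break`
def ccSatB (m : PySem.Dict (Int × Int) (List Int)) (vis : PySem.Set (Int × Int)) :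
    Nat → PySem.Set (Int × Int) → PySem.Set (Int × Int)
  | 0, comp => comp
  | fuel + 1, comp =>
    let g := ccGrowB m vis comp
    if g.length = comp.length then comp else ccSatB m vis fuel g

-- one iteration of `for coord in coord_to_indices:`
def ccOuterB (m : PySem.Dict (Int × Int) (List Int))
    (st : List Int × Int × PySem.Set (Int × Int)) (c : Int × Int) :
    List Int × Int × PySem.Set (Int × Int) :=
  if PySem.Set.contains st.2.2 c then st
  else
    let comp := ccSatB m st.2.2 m.size (PySem.Set.ofList [c])
    let lab := comp.foldl (fun L x => ccWriteB (m.getD x []) st.2.1 L) st.1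
    (lab, st.2.1 + 1, PySem.Set.union st.2.2 comp)

def connected_cluster_alt (points : List (Int × Int)) : List Int × Int :=
  let m := ccDictB points
  let st := m.keys.foldl (ccOuterB m)
    (List.replicate points.length (-1), 0, PySem.Set.empty)
  (st.1, st.2.1)

-- ===== PRECONDITION & SPEC =====
def Spec_connected_cluster (points : List (Int × Int)) (out : List Int × Int) : Prop := out = connected_cluster_alt points
instance (points : List (Int × Int)) (out : List Int × Int) : Decidable (Spec_connected_cluster points out) := by unfold Spec_connected_cluster; infer_instance

-- ===== CLAIM (what is proved, stated in full; the proofs are below) =====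
def Claim_equal_connected_cluster : Prop := ∀ (points : List (Int × Int)), Dom_connected_cluster points → Spec_connected_cluster points (connected_cluster points)

-- ===== LEMMAS AND PROOFS =====

-- coordinate stored for point j (j an Int index)
def pcd (pts : List (Int × Int)) (j : Int) : Int × Int :=
  PySem.List.pyGetD pts j ((0 : Int), (0 : Int))

-- one 4-neighbour step in the grid restricted to keys of m and to coords outside V
def ccStep (m : PySem.Dict (Int × Int) (List Int)) (V : List (Int × Int))
    (a b : Int × Int) : Prop :=
  (∃ d ∈ ccOffsets, b = (a.1 + d.1, a.2 + d.2)) ∧ m.contains b = true ∧ b ∉ V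

def ccReach (m : PySem.Dict (Int × Int) (List Int)) (V : List (Int × Int))
    (c x : Int × Int) : Prop :=
  Relation.ReflTransGen (ccStep m V) c x

theorem ccDictB_eq (pts : List (Int × Int)) : ccDictB pts = ccDictA pts := rfl

theorem ccDictA_eq_map (pts : List (Int × Int)) :
    ccDictA pts = ((PySem.List.enumerate pts 0).map (fun p => (((p.2.1 : Int), (p.2.2 : Int)), p.1))).foldl
      (fun d p => d.modify p.1 [] (fun l => l ++ [p.2])) PySem.Dict.empty := by
  rw [List.foldl_map]; rfl

theorem ccDictA_getD (pts : List (Int × Int)) (c : Int × Int) :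
    (ccDictA pts).getD c [] =
      (PySem.List.pyRange 0 pts.length 1).filter (fun j => pcd pts j == c) := by
  rw [ccDictA_eq_map, PySem.Dict.getD_foldl_modify_append]
  rw [PySem.List.enumerate_eq_map_pyRange (d := ((0:Int),(0:Int)))]
  simp [List.filter_map, List.map_map, Function.comp_def, pcd]

theorem ccDictA_keys (pts : List (Int × Int)) :
    (ccDictA pts).keys = PySem.Set.ofList pts := by
  unfold ccDictA
  rw [PySem.Dict.keys_foldl_modify_key]
  rw [show List.map (fun (p : Int × (Int × Int)) => ((p.2.1 : Int), (p.2.2 : Int))) (PySem.List.enumerate pts 0) = (PySem.List.enumerate pts 0).map (fun p => p.2) from by simp]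
  rw [PySem.List.map_snd_enumerate]
  simp [PySem.Set.update_nil_left]

theorem ccDictA_keys_nodup (pts : List (Int × Int)) : (ccDictA pts).keys.Nodup := by
  rw [ccDictA_keys]; exact PySem.Set.nodup_ofList pts

theorem ccDictA_size (pts : List (Int × Int)) :
    (ccDictA pts).size = (ccDictA pts).keys.length := by
  simp [PySem.Dict.size, PySem.Dict.keys]

-- an element list that is Nodup and inside the keys is no longer than size
theorem ccLen_le_size (pts : List (Int × Int)) (l : List (Int × Int))
    (hnd : l.Nodup) (hc : ∀ x ∈ l, (ccDictA pts).contains x = true) :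
    l.length ≤ (ccDictA pts).size := by
  rw [ccDictA_size]
  exact (hnd.subperm (fun x hx => (PySem.Dict.contains_iff_mem_keys _ _).1 (hc x hx))).length_le

theorem ccReach_congr (m : PySem.Dict (Int × Int) (List Int))
    (V V' : List (Int × Int)) (h : ∀ x, x ∈ V ↔ x ∈ V') (c x : Int × Int) :
    ccReach m V c x → ccReach m V' c x := by
  intro hr
  induction hr with
  | refl => exact Relation.ReflTransGen.refl
  | tail _ hstep ih =>
      exact ih.tail ⟨hstep.1, hstep.2.1, fun hm => hstep.2.2 ((h _).2 hm)⟩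

theorem ccReach_not_mem (m : PySem.Dict (Int × Int) (List Int))
    (V : List (Int × Int)) (c x : Int × Int) (hc : c ∉ V) (h : ccReach m V c x) :
    x ∉ V := by
  induction h with
  | refl => exact hc
  | tail _ hstep _ => exact hstep.2.2

theorem ccWrite_ints (cid : Int) :
    ∀ (js : List Int) (L : List Int), (∀ j ∈ js, 0 ≤ j ∧ j.toNat < L.length) →
    (ccWriteA js cid L).length = L.length ∧
    ∀ k : Nat, k < L.length →
      (ccWriteA js cid L).getD k 0 = if (k : Int) ∈ js then cid else L.getD k 0 := by
  intro js
  induction js with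
  | nil => intro L h; exact ⟨rfl, fun k hk => by simp [ccWriteA]⟩
  | cons j js ih =>
      intro L h
      have hj := h j (List.mem_cons_self ..)
      have hstep : ccWriteA (j :: js) cid L = ccWriteA js cid (L.set j.toNat cid) := by
        simp [ccWriteA, PySem.List.pySetD_of_nonneg L cid hj.1]
      have ihh := ih (L.set j.toNat cid) (fun x hx =>
        ⟨(h x (List.mem_cons_of_mem _ hx)).1,
         by simpa using (h x (List.mem_cons_of_mem _ hx)).2⟩)
      rw [hstep]
      refine ⟨by rw [ihh.1]; simp, fun k hk => ?_⟩
      rw [ihh.2 k (by simpa using hk)]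
      have hset : (L.set j.toNat cid).getD k 0 = if j.toNat = k then cid else L.getD k 0 := by
        simp only [List.getD_eq_getElem?_getD, List.getElem?_set]
        by_cases hkj : j.toNat = k
        · simp [hkj, (by omega : k < L.length)]
        · simp [hkj]
      rw [hset]
      by_cases hc : (k : Int) ∈ j :: js
      · simp only [hc, if_true]
        rcases List.mem_cons.1 hc with h1 | h2
        · have hkj : j.toNat = k := by omega
          by_cases hmem : (k : Int) ∈ js
          · simp [hmem]
          · simp [hmem, hkj]
        · simp [h2]
      · have hmem : (k : Int) ∉ js := fun h2 => hc (List.mem_cons_of_mem _ h2)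
        have hkj : ¬ (j.toNat = k) := fun he => hc (List.mem_cons.2 (Or.inl (by omega)))
        simp [hc, hmem, hkj]

-- writing cid at every index of coord c, pointwise description
theorem ccWriteA_spec (pts : List (Int × Int)) (c : Int × Int) (cid : Int)
    (L : List Int) (hL : L.length = pts.length) :
    (ccWriteA ((ccDictA pts).getD c []) cid L).length = pts.length ∧
    ∀ k : Nat, k < pts.length →
      (ccWriteA ((ccDictA pts).getD c []) cid L).getD k 0 =
        if pcd pts (k : Int) = c then cid else L.getD k 0 := by
  rw [ccDictA_getD]
  have hjs : ∀ j ∈ (PySem.List.pyRange 0 pts.length 1).filter (fun j => pcd pts j == c),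
      0 ≤ j ∧ j.toNat < L.length := by
    intro j hjm
    have := PySem.List.mem_pyRange_one.1 (List.mem_of_mem_filter hjm)
    omega
  obtain ⟨h1, h2⟩ := ccWrite_ints cid _ L hjs
  refine ⟨by rw [h1, hL], fun k hk => ?_⟩
  rw [h2 k (by omega)]
  have hmm : ((k : Int) ∈ (PySem.List.pyRange 0 pts.length 1).filter (fun j => pcd pts j == c))
      ↔ pcd pts (k : Int) = c := by
    constructor
    · intro hm
      have := List.of_mem_filter hm
      simpa using this
    · intro he
      refine List.mem_filter.2 ⟨PySem.List.mem_pyRange_one.2 (by omega), by simpa using he⟩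
  by_cases hcnd : pcd pts (k : Int) = c
  · simp [hmm.2 hcnd, hcnd]
  · simp [hcnd]

-- B's per-component labelling pass, pointwise description
theorem ccWriteB_fold_spec (pts : List (Int × Int)) (C : List (Int × Int)) (cid : Int)
    (L : List Int) (hL : L.length = pts.length) :
    (C.foldl (fun L x => ccWriteB ((ccDictA pts).getD x []) cid L) L).length = pts.length ∧
    ∀ k : Nat, k < pts.length →
      (C.foldl (fun L x => ccWriteB ((ccDictA pts).getD x []) cid L) L).getD k 0 =
        if pcd pts (k : Int) ∈ C then cid else L.getD k 0 := by
  induction C generalizing L with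
  | nil => exact ⟨hL, fun k hk => by simp⟩
  | cons x C ih =>
      have hw := ccWriteA_spec pts x cid L hL
      have ihh := ih (ccWriteB ((ccDictA pts).getD x []) cid L) hw.1
      refine ⟨by simpa using ihh.1, fun k hk => ?_⟩
      have hpt := ihh.2 k hk
      simp only [List.foldl_cons] at *
      rw [hpt]
      by_cases h1 : pcd pts (k : Int) ∈ C
      · simp [h1]
      · have h2 := hw.2 k hk
        rw [show ccWriteB ((ccDictA pts).getD x []) cid L = ccWriteA ((ccDictA pts).getD x []) cid L from rfl, h2]
        by_cases h3 : pcd pts (k : Int) = x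
        · simp [h3]
        · simp [h1, h3]

-- characterisation of the neighbour fold of A
theorem ccNbrA_spec (pts : List (Int × Int)) (cid : Int) (c : Int × Int)
    (ds : List (Int × Int)) (vis : PySem.Set (Int × Int)) (stk : List (Int × Int))
    (lab : List Int) (hnd : vis.Nodup) (hstk : stk.Nodup)
    (hsv : ∀ x ∈ stk, x ∈ vis) (hlen : lab.length = pts.length) :
    (∀ x, x ∈ (ccNbrA (ccDictA pts) cid c ds (vis, stk, lab)).1 ↔
        x ∈ vis ∨ (∃ d ∈ ds, x = (c.1 + d.1, c.2 + d.2) ∧ (ccDictA pts).contains x = true)) ∧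
    (ccNbrA (ccDictA pts) cid c ds (vis, stk, lab)).1.Nodup ∧
    (∀ x, x ∈ (ccNbrA (ccDictA pts) cid c ds (vis, stk, lab)).2.1 ↔
        x ∈ stk ∨ (x ∈ (ccNbrA (ccDictA pts) cid c ds (vis, stk, lab)).1 ∧ x ∉ vis)) ∧
    (ccNbrA (ccDictA pts) cid c ds (vis, stk, lab)).2.1.Nodup ∧
    (ccNbrA (ccDictA pts) cid c ds (vis, stk, lab)).1.length + stk.length =
      vis.length + (ccNbrA (ccDictA pts) cid c ds (vis, stk, lab)).2.1.length ∧
    stk.length ≤ (ccNbrA (ccDictA pts) cid c ds (vis, stk, lab)).2.1.length ∧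
    (ccNbrA (ccDictA pts) cid c ds (vis, stk, lab)).2.2.length = pts.length ∧
    ∀ k : Nat, k < pts.length →
      (ccNbrA (ccDictA pts) cid c ds (vis, stk, lab)).2.2.getD k 0 =
        if pcd pts (k : Int) ∈ (ccNbrA (ccDictA pts) cid c ds (vis, stk, lab)).1 ∧
           pcd pts (k : Int) ∉ vis then cid else lab.getD k 0 := by
  induction ds generalizing vis stk lab with
  | nil =>
      refine ⟨fun x => by simp [ccNbrA], by simpa [ccNbrA] using hnd,
        fun x => by simp [ccNbrA], by simpa [ccNbrA] using hstk,
        by simp [ccNbrA], by simp [ccNbrA], by simpa [ccNbrA] using hlen,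
        fun k hk => by simp [ccNbrA]⟩
  | cons d ds ih =>
      by_cases hg : ((ccDictA pts).contains (c.1 + d.1, c.2 + d.2)
          && !(PySem.Set.contains vis (c.1 + d.1, c.2 + d.2))) = true
      · have hg' := hg
        simp only [Bool.and_eq_true, Bool.not_eq_true'] at hg'
        have hcn : (ccDictA pts).contains (c.1 + d.1, c.2 + d.2) = true := hg'.1
        have hnv : (c.1 + d.1, c.2 + d.2) ∉ vis := by
          intro hm
          have hct := (PySem.Set.contains_iff vis _).2 hm
          rw [hg'.2] at hct
          exact absurd hct (by simp)
        have hstep : ccNbrA (ccDictA pts) cid c (d :: ds) (vis, stk, lab) =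
            ccNbrA (ccDictA pts) cid c ds
              (PySem.Set.add vis (c.1 + d.1, c.2 + d.2), stk ++ [(c.1 + d.1, c.2 + d.2)],
                ccWriteA ((ccDictA pts).getD (c.1 + d.1, c.2 + d.2) []) cid lab) := by
          simp only [ccNbrA, List.foldl_cons]
          congr 1
          simp only [hg, if_true]
        have hwl := ccWriteA_spec pts (c.1 + d.1, c.2 + d.2) cid lab hlen
        have hnstk : (c.1 + d.1, c.2 + d.2) ∉ stk := fun hm => hnv (hsv _ hm)
        obtain ⟨i1, i2, i3, i4, i5, i6, i7, i8⟩ :=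
          ih (PySem.Set.add vis (c.1 + d.1, c.2 + d.2)) (stk ++ [(c.1 + d.1, c.2 + d.2)])
            (ccWriteA ((ccDictA pts).getD (c.1 + d.1, c.2 + d.2) []) cid lab)
            (PySem.Set.nodup_add _ _ hnd)
            (hstk.append (List.nodup_singleton _) ((List.disjoint_singleton ..).2 hnstk))
            (fun x hx => by
              rcases List.mem_append.1 hx with h1 | h2
              · exact (PySem.Set.mem_add _ _ _).2 (Or.inl (hsv x h1))
              · exact (PySem.Set.mem_add _ _ _).2 (Or.inr (by simpa using h2)))
            hwl.1
        rw [hstep]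
        have hmemQ : ∀ x : Int × Int, (x ∈ PySem.Set.add vis (c.1 + d.1, c.2 + d.2) ∨
              (∃ d' ∈ ds, x = (c.1 + d'.1, c.2 + d'.2) ∧ (ccDictA pts).contains x = true)) ↔
            (x ∈ vis ∨ ∃ d' ∈ d :: ds, x = (c.1 + d'.1, c.2 + d'.2) ∧
              (ccDictA pts).contains x = true) := by
          intro x
          rw [PySem.Set.mem_add _ _ _]
          constructor
          · rintro ((h1 | h2) | h3)
            · exact Or.inl h1
            · exact Or.inr ⟨d, List.mem_cons_self .., h2, h2 ▸ hcn⟩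
            · obtain ⟨d', hd', he, hc'⟩ := h3
              exact Or.inr ⟨d', List.mem_cons_of_mem _ hd', he, hc'⟩
          · rintro (h1 | ⟨d', hd', he, hc'⟩)
            · exact Or.inl (Or.inl h1)
            · rcases List.mem_cons.1 hd' with h2 | h2
              · exact Or.inl (Or.inr (by rw [he, h2]))
              · exact Or.inr ⟨d', h2, he, hc'⟩
        refine ⟨fun x => (i1 x).trans (hmemQ x), i2, fun x => ?_, i4, ?_, ?_, i7, fun k hk => ?_⟩
        · rw [i3 x]
          constructor
          · rintro (h1 | h2)
            · rcases List.mem_append.1 h1 with h3 | h4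
              · exact Or.inl h3
              · have h4' : x = (c.1 + d.1, c.2 + d.2) := by simpa using h4
                refine Or.inr ⟨?_, h4' ▸ hnv⟩
                have hx : x ∈ PySem.Set.add vis (c.1 + d.1, c.2 + d.2) := by
                  rw [h4']; exact (PySem.Set.mem_add _ _ _).2 (Or.inr rfl)
                exact (i1 x).2 (Or.inl hx)
            · exact Or.inr ⟨h2.1, fun hm => h2.2 ((PySem.Set.mem_add _ _ _).2 (Or.inl hm))⟩
          · rintro (h1 | ⟨h2, h3⟩)
            · exact Or.inl (List.mem_append.2 (Or.inl h1))
            · by_cases hx : x = (c.1 + d.1, c.2 + d.2)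
              · exact Or.inl (List.mem_append.2 (Or.inr (by simp [hx])))
              · exact Or.inr ⟨h2, fun hm => ((PySem.Set.mem_add _ _ _).1 hm).elim h3 hx⟩
        · have hl1 : (PySem.Set.add vis (c.1 + d.1, c.2 + d.2)).length = vis.length + 1 := by
            rw [PySem.Set.add_of_not_mem hnv]; simp
          have := i5
          rw [hl1] at this
          simp only [List.length_append, List.length_cons, List.length_nil] at this ⊢
          omega
        · have := i6
          simp only [List.length_append, List.length_cons, List.length_nil] at this
          omega
        · rw [i8 k hk]
          have hw2 := hwl.2 k hk
          by_cases hpv : pcd pts (k : Int) ∈ vis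
          · have h1 : pcd pts (k : Int) ∈ PySem.Set.add vis (c.1 + d.1, c.2 + d.2) :=
              (PySem.Set.mem_add _ _ _).2 (Or.inl hpv)
            have h2 : pcd pts (k : Int) ≠ (c.1 + d.1, c.2 + d.2) := fun he => hnv (he ▸ hpv)
            rw [if_neg (fun hh => hh.2 h1), hw2, if_neg h2,
              if_neg (fun hh => (hh.2 : _ ∉ _) hpv)]
          · by_cases hpr : pcd pts (k : Int) ∈
                (ccNbrA (ccDictA pts) cid c ds
                  (PySem.Set.add vis (c.1 + d.1, c.2 + d.2), stk ++ [(c.1 + d.1, c.2 + d.2)],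
                    ccWriteA ((ccDictA pts).getD (c.1 + d.1, c.2 + d.2) []) cid lab)).1
            · by_cases hpa : pcd pts (k : Int) ∈ PySem.Set.add vis (c.1 + d.1, c.2 + d.2)
              · have he : pcd pts (k : Int) = (c.1 + d.1, c.2 + d.2) :=
                  ((PySem.Set.mem_add _ _ _).1 hpa).resolve_left hpv
                rw [if_neg (fun hh => hh.2 hpa), hw2, if_pos he, if_pos ⟨hpr, hpv⟩]
              · rw [if_pos ⟨hpr, hpa⟩, if_pos ⟨hpr, hpv⟩]
            · have hne : pcd pts (k : Int) ≠ (c.1 + d.1, c.2 + d.2) := fun he =>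
                hpr ((i1 _).2 (Or.inl (by rw [he]; exact (PySem.Set.mem_add _ _ _).2 (Or.inr rfl))))
              rw [if_neg (fun hh => hpr hh.1), hw2, if_neg hne, if_neg (fun hh => hpr hh.1)]
      · have hstep : ccNbrA (ccDictA pts) cid c (d :: ds) (vis, stk, lab) =
            ccNbrA (ccDictA pts) cid c ds (vis, stk, lab) := by
          simp only [ccNbrA, List.foldl_cons]
          congr 1
          simp only [Bool.not_eq_true] at hg
          simp only [hg, Bool.false_eq_true, if_false]
        obtain ⟨i1, i2, i3, i4, i5, i6, i7, i8⟩ := ih vis stk lab hnd hstk hsv hlen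
        rw [hstep]
        refine ⟨fun x => (i1 x).trans ?_, i2, i3, i4, i5, i6, i7, i8⟩
        constructor
        · rintro (h1 | ⟨d', hd', he, hc'⟩)
          · exact Or.inl h1
          · exact Or.inr ⟨d', List.mem_cons_of_mem _ hd', he, hc'⟩
        · rintro (h1 | ⟨d', hd', he, hc'⟩)
          · exact Or.inl h1
          · rcases List.mem_cons.1 hd' with h2 | h2
            · have he' : x = (c.1 + d.1, c.2 + d.2) := by rw [he, h2]
              rcases Bool.eq_false_or_eq_true (PySem.Set.contains vis (c.1 + d.1, c.2 + d.2)) with hv | hv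
              · exact Or.inl (by rw [he']; exact (PySem.Set.contains_iff _ _).1 hv)
              · exfalso
                apply hg
                rw [he'] at hc'
                rw [hc', hv]
                rfl
            · exact Or.inr ⟨d', h2, he, hc'⟩

-- the DFS loop computes exactly the reachable set and labels it
theorem ccDfsA_spec (pts : List (Int × Int)) (cid : Int) (V0 : List (Int × Int))
    (c : Int × Int) (L0 : List Int) :
    ∀ (fuel : Nat) (vis : PySem.Set (Int × Int)) (stk : List (Int × Int)) (lab : List Int),
    vis.Nodup →
    (∀ x ∈ vis, (ccDictA pts).contains x = true) →
    (∀ x ∈ V0, x ∈ vis) →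
    c ∈ vis → c ∉ V0 →
    (∀ x ∈ vis, x ∉ V0 → ccReach (ccDictA pts) V0 c x) →
    stk.Nodup → (∀ x ∈ stk, x ∈ vis ∧ x ∉ V0) →
    (∀ x ∈ vis, x ∉ V0 → x ∉ stk → ∀ d ∈ ccOffsets,
        (ccDictA pts).contains (x.1 + d.1, x.2 + d.2) = true →
        (x.1 + d.1, x.2 + d.2) ∈ vis) →
    lab.length = pts.length →
    (∀ k : Nat, k < pts.length → lab.getD k 0 =
        if pcd pts (k : Int) ∈ vis ∧ pcd pts (k : Int) ∉ V0 then cid else L0.getD k 0) →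
    5 * (ccDictA pts).size + stk.length + 5 ≤ fuel + 5 * vis.length →
    (∀ x, x ∈ (ccDfsA (ccDictA pts) cid fuel (vis, stk, lab)).1 ↔
        x ∈ V0 ∨ ccReach (ccDictA pts) V0 c x) ∧
    (ccDfsA (ccDictA pts) cid fuel (vis, stk, lab)).1.Nodup ∧
    (∀ x ∈ (ccDfsA (ccDictA pts) cid fuel (vis, stk, lab)).1,
        (ccDictA pts).contains x = true) ∧
    (ccDfsA (ccDictA pts) cid fuel (vis, stk, lab)).2.length = pts.length ∧
    ∀ k : Nat, k < pts.length →
      (ccDfsA (ccDictA pts) cid fuel (vis, stk, lab)).2.getD k 0 =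
        if pcd pts (k : Int) ∈ (ccDfsA (ccDictA pts) cid fuel (vis, stk, lab)).1 ∧
           pcd pts (k : Int) ∉ V0 then cid else L0.getD k 0 := by
  intro fuel
  induction fuel with
  | zero =>
      intro vis stk lab h1 h2 h3 h4 h5 h6 h7 h8 h9 h10 h11 hF
      exfalso
      have hv := ccLen_le_size pts vis h1 h2
      omega
  | succ fuel ih =>
      intro vis stk lab h1 h2 h3 h4 h5 h6 h7 h8 h9 h10 h11 hF
      by_cases hstk0 : stk = []
      · have hred : ccDfsA (ccDictA pts) cid (fuel + 1) (vis, stk, lab) = (vis, lab) := by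
          simp [ccDfsA, hstk0]
        rw [hred]
        have haux : ∀ x, ccReach (ccDictA pts) V0 c x → x ∈ vis ∧ x ∉ V0 := by
          intro x hx
          induction hx with
          | refl => exact ⟨h4, h5⟩
          | tail hab hstep ihx =>
              obtain ⟨d, hd, he⟩ := hstep.1
              refine ⟨?_, hstep.2.2⟩
              have := h9 _ ihx.1 ihx.2 (by simp [hstk0]) d hd (he ▸ hstep.2.1)
              rwa [← he] at this
        refine ⟨fun x => ?_, h1, h2, h10, fun k hk => h11 k hk⟩
        constructor
        · intro hx
          by_cases hx0 : x ∈ V0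
          · exact Or.inl hx0
          · exact Or.inr (h6 x hx hx0)
        · rintro (hx | hx)
          · exact h3 x hx
          · exact (haux x hx).1
      · have hred : ccDfsA (ccDictA pts) cid (fuel + 1) (vis, stk, lab) =
            ccDfsA (ccDictA pts) cid fuel
              (ccNbrA (ccDictA pts) cid (stk.getLast hstk0) ccOffsets
                (vis, stk.dropLast, lab)) := by
          simp [ccDfsA, hstk0]
        rw [hred]
        have hc'stk : stk.getLast hstk0 ∈ stk := List.getLast_mem hstk0
        obtain ⟨hc'vis, hc'V0⟩ := h8 _ hc'stk
        have hdlsub : ∀ x ∈ stk.dropLast, x ∈ stk :=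
          fun x hx => (List.dropLast_sublist _).subset hx
        obtain ⟨i1, i2, i3, i4, i5, i6, i7, i8⟩ :=
          ccNbrA_spec pts cid (stk.getLast hstk0) ccOffsets vis stk.dropLast lab h1
            (h7.sublist (List.dropLast_sublist _))
            (fun x hx => (h8 x (hdlsub x hx)).1) h10
        refine ih (ccNbrA (ccDictA pts) cid (stk.getLast hstk0) ccOffsets (vis, stk.dropLast, lab)).1
          (ccNbrA (ccDictA pts) cid (stk.getLast hstk0) ccOffsets (vis, stk.dropLast, lab)).2.1
          (ccNbrA (ccDictA pts) cid (stk.getLast hstk0) ccOffsets (vis, stk.dropLast, lab)).2.2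
          ?_ ?_ ?_ ?_ ?_ ?_ ?_ ?_ ?_ ?_ ?_ ?_
        · exact i2
        · intro x hx
          rcases (i1 x).1 hx with hxv | ⟨d, hd, he, hc⟩
          · exact h2 x hxv
          · exact hc
        · intro x hx
          exact (i1 x).2 (Or.inl (h3 x hx))
        · exact (i1 c).2 (Or.inl h4)
        · exact h5
        · intro x hx hx0
          rcases (i1 x).1 hx with hxv | ⟨d, hd, he, hc⟩
          · exact h6 x hxv hx0
          · exact (h6 _ hc'vis hc'V0).tail ⟨⟨d, hd, he⟩, hc, hx0⟩
        · exact i4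
        · intro x hx
          rcases (i3 x).1 hx with hxd | ⟨hxv', hxv⟩
          · exact ⟨(i1 x).2 (Or.inl (h8 x (hdlsub x hxd)).1), (h8 x (hdlsub x hxd)).2⟩
          · exact ⟨hxv', fun h0 => hxv (h3 x h0)⟩
        · intro x hxv' hxV0 hxstk' d hd hcont
          by_cases hxvis : x ∈ vis
          · by_cases hxstk : x ∈ stk
            · have hxdl : x ∉ stk.dropLast := fun hdl => hxstk' ((i3 x).2 (Or.inl hdl))
              have hxc' : x = stk.getLast hstk0 := by
                have hsplit := List.dropLast_append_getLast hstk0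
                rcases List.mem_append.1 (hsplit ▸ hxstk) with h | h
                · exact absurd h hxdl
                · simpa using h
              refine (i1 _).2 (Or.inr ⟨d, hd, ?_, hcont⟩)
              rw [hxc']
            · exact (i1 _).2 (Or.inl (h9 x hxvis hxV0 hxstk d hd hcont))
          · exact absurd ((i3 x).2 (Or.inr ⟨hxv', hxvis⟩)) hxstk'
        · exact i7
        · intro k hk
          rw [i8 k hk]
          by_cases hv : pcd pts (k : Int) ∈ vis
          · rw [if_neg (fun hh => hh.2 hv), h11 k hk]
            have hv' : pcd pts (k : Int) ∈
                (ccNbrA (ccDictA pts) cid (stk.getLast hstk0) ccOffsets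
                  (vis, stk.dropLast, lab)).1 := (i1 _).2 (Or.inl hv)
            by_cases h0 : pcd pts (k : Int) ∈ V0
            · rw [if_neg (fun hh => hh.2 h0), if_neg (fun hh => hh.2 h0)]
            · rw [if_pos ⟨hv, h0⟩, if_pos ⟨hv', h0⟩]
          · by_cases hv' : pcd pts (k : Int) ∈
                (ccNbrA (ccDictA pts) cid (stk.getLast hstk0) ccOffsets
                  (vis, stk.dropLast, lab)).1
            · have h0 : pcd pts (k : Int) ∉ V0 := fun h0 => hv (h3 _ h0)
              rw [if_pos ⟨hv', hv⟩, if_pos ⟨hv', h0⟩]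
            · rw [if_neg (fun hh => hv' hh.1), if_neg (fun hh => hv' hh.1), h11 k hk,
                if_neg (fun hh => hv hh.1)]
        · have hdl : stk.dropLast.length = stk.length - 1 := by simp
          have hpos : 0 < stk.length := List.length_pos_iff.2 hstk0
          omega

theorem ccNbrList (a x : Int × Int) :
    x ∈ [((a.1 + 1 : Int), a.2), (a.1 - 1, a.2), (a.1, a.2 + 1), (a.1, a.2 - 1)] ↔
      ∃ d ∈ ccOffsets, x = (a.1 + d.1, a.2 + d.2) := by
  simp only [ccOffsets, List.mem_cons, List.not_mem_nil, or_false]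
  constructor
  · rintro (h | h | h | h)
    · exact ⟨(1, 0), by simp, by simp [h]⟩
    · exact ⟨(-1, 0), by simp, by simp [h, sub_eq_add_neg]⟩
    · exact ⟨(0, 1), by simp, by simp [h]⟩
    · exact ⟨(0, -1), by simp, by simp [h, sub_eq_add_neg]⟩
  · rintro ⟨d, hd, he⟩
    rcases hd with h | h | h | h
    · subst h; left; simp [he]
    · subst h; right; left; simp [he, sub_eq_add_neg]
    · subst h; right; right; left; simp [he]
    · subst h; right; right; right; simp [he, sub_eq_add_neg]

theorem ccGrowInner (m : PySem.Dict (Int × Int) (List Int)) (vis : PySem.Set (Int × Int)) :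
    ∀ (ns : List (Int × Int)) (g : PySem.Set (Int × Int)), g.Nodup →
    (∀ x, x ∈ ns.foldl (fun g n =>
        if m.contains n && !(PySem.Set.contains vis n) then PySem.Set.add g n else g) g ↔
      x ∈ g ∨ (x ∈ ns ∧ m.contains x = true ∧ x ∉ vis)) ∧
    (∃ ex, ns.foldl (fun g n =>
        if m.contains n && !(PySem.Set.contains vis n) then PySem.Set.add g n else g) g = g ++ ex) ∧
    (ns.foldl (fun g n =>
        if m.contains n && !(PySem.Set.contains vis n) then PySem.Set.add g n else g) g).Nodup := by
  intro ns
  induction ns with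
  | nil => exact fun g hg => ⟨fun x => by simp, ⟨[], by simp⟩, hg⟩
  | cons n ns ih =>
      intro g hg
      by_cases hgd : (m.contains n && !(PySem.Set.contains vis n)) = true
      · have hgd' := hgd
        simp only [Bool.and_eq_true, Bool.not_eq_true'] at hgd'
        have hnvis : n ∉ vis := by
          intro hm
          have := (PySem.Set.contains_iff vis n).2 hm
          rw [hgd'.2] at this
          exact absurd this (by simp)
        have hstep : (n :: ns).foldl (fun g n =>
            if m.contains n && !(PySem.Set.contains vis n) then PySem.Set.add g n else g) g =
            ns.foldl (fun g n =>
              if m.contains n && !(PySem.Set.contains vis n) then PySem.Set.add g n else g)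
              (PySem.Set.add g n) := by
          simp only [List.foldl_cons]
          congr 1
          simp only [hgd, if_true]
        obtain ⟨j1, j2, j3⟩ := ih (PySem.Set.add g n) (PySem.Set.nodup_add _ _ hg)
        rw [hstep]
        refine ⟨fun x => (j1 x).trans ?_, ?_, j3⟩
        · rw [PySem.Set.mem_add _ _ _]
          constructor
          · rintro ((h | h) | ⟨h1, h2⟩)
            · exact Or.inl h
            · exact Or.inr ⟨List.mem_cons.2 (Or.inl h), h ▸ hgd'.1, h ▸ hnvis⟩
            · exact Or.inr ⟨List.mem_cons_of_mem _ h1, h2⟩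
          · rintro (h | ⟨h1, h2⟩)
            · exact Or.inl (Or.inl h)
            · rcases List.mem_cons.1 h1 with h3 | h3
              · exact Or.inl (Or.inr h3)
              · exact Or.inr ⟨h3, h2⟩
        · obtain ⟨ex2, hex2⟩ := j2
          by_cases hmem : n ∈ g
          · refine ⟨ex2, ?_⟩
            rw [PySem.Set.add_of_mem hmem] at hex2 ⊢
            exact hex2
          · exact ⟨[n] ++ ex2, by rw [hex2, PySem.Set.add_of_not_mem hmem, List.append_assoc]⟩
      · have hstep : (n :: ns).foldl (fun g n =>
            if m.contains n && !(PySem.Set.contains vis n) then PySem.Set.add g n else g) g =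
            ns.foldl (fun g n =>
              if m.contains n && !(PySem.Set.contains vis n) then PySem.Set.add g n else g) g := by
          simp only [List.foldl_cons]
          congr 1
          simp only [Bool.not_eq_true] at hgd
          simp only [hgd, Bool.false_eq_true, if_false]
        obtain ⟨j1, j2, j3⟩ := ih g hg
        rw [hstep]
        refine ⟨fun x => (j1 x).trans ?_, j2, j3⟩
        constructor
        · rintro (h | ⟨h1, h2⟩)
          · exact Or.inl h
          · exact Or.inr ⟨List.mem_cons_of_mem _ h1, h2⟩
        · rintro (h | ⟨h1, h2⟩)
          · exact Or.inl h
          · rcases List.mem_cons.1 h1 with h3 | h3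
            · exfalso
              apply hgd
              rw [← h3, h2.1]
              have hvv : PySem.Set.contains vis x = false := by
                cases hb : PySem.Set.contains vis x
                · rfl
                · exact absurd ((PySem.Set.contains_iff _ _).1 hb) h2.2
              rw [hvv]
              rfl
            · exact Or.inr ⟨h3, h2⟩

theorem ccGrowOuter (m : PySem.Dict (Int × Int) (List Int)) (vis : PySem.Set (Int × Int)) :
    ∀ (l : List (Int × Int)) (g : PySem.Set (Int × Int)), g.Nodup →
    (∀ x, x ∈ l.foldl (fun g c =>
        [((c.1 + 1 : Int), c.2), (c.1 - 1, c.2), (c.1, c.2 + 1), (c.1, c.2 - 1)].foldl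
          (fun g n =>
            if m.contains n && !(PySem.Set.contains vis n) then PySem.Set.add g n else g) g) g ↔
      x ∈ g ∨ ∃ a ∈ l, ccStep m vis a x) ∧
    (∃ ex, l.foldl (fun g c =>
        [((c.1 + 1 : Int), c.2), (c.1 - 1, c.2), (c.1, c.2 + 1), (c.1, c.2 - 1)].foldl
          (fun g n =>
            if m.contains n && !(PySem.Set.contains vis n) then PySem.Set.add g n else g) g) g = g ++ ex) ∧
    (l.foldl (fun g c =>
        [((c.1 + 1 : Int), c.2), (c.1 - 1, c.2), (c.1, c.2 + 1), (c.1, c.2 - 1)].foldl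
          (fun g n =>
            if m.contains n && !(PySem.Set.contains vis n) then PySem.Set.add g n else g) g) g).Nodup := by
  intro l
  induction l with
  | nil => exact fun g hg => ⟨fun x => by simp, ⟨[], by simp⟩, hg⟩
  | cons a l ih =>
      intro g hg
      obtain ⟨j1, j2, j3⟩ := ccGrowInner m vis
        [((a.1 + 1 : Int), a.2), (a.1 - 1, a.2), (a.1, a.2 + 1), (a.1, a.2 - 1)] g hg
      obtain ⟨k1, k2, k3⟩ := ih _ j3
      rw [List.foldl_cons]
      refine ⟨fun x => (k1 x).trans ?_, ?_, k3⟩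
      · constructor
        · rintro (h | ⟨b, hb, hs⟩)
          · rcases (j1 x).1 h with h1 | ⟨h1, h2, h3⟩
            · exact Or.inl h1
            · exact Or.inr ⟨a, List.mem_cons_self .., (ccNbrList a x).1 h1, h2, h3⟩
          · exact Or.inr ⟨b, List.mem_cons_of_mem _ hb, hs⟩
        · rintro (h | ⟨b, hb, hs⟩)
          · exact Or.inl ((j1 x).2 (Or.inl h))
          · rcases List.mem_cons.1 hb with h1 | h1
            · subst h1
              exact Or.inl ((j1 x).2 (Or.inr ⟨(ccNbrList b x).2 hs.1, hs.2.1, hs.2.2⟩))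
            · exact Or.inr ⟨b, h1, hs⟩
      · obtain ⟨ex1, hex1⟩ := j2
        obtain ⟨ex2, hex2⟩ := k2
        exact ⟨ex1 ++ ex2, by rw [hex2, hex1, List.append_assoc]⟩

-- characterisation of one growth step of B
theorem ccGrowB_spec (m : PySem.Dict (Int × Int) (List Int))
    (vis comp : PySem.Set (Int × Int)) (hnd : comp.Nodup) :
    (∀ x, x ∈ ccGrowB m vis comp ↔
        x ∈ comp ∨ ∃ a ∈ comp, ccStep m vis a x) ∧
    (∃ ex, ccGrowB m vis comp = comp ++ ex) ∧ (ccGrowB m vis comp).Nodup := by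
  have houter := ccGrowOuter m vis comp (PySem.Set.ofList comp)
    (PySem.Set.nodup_ofList comp)
  rw [PySem.Set.ofList_eq_self_of_nodup comp hnd] at houter
  have hdef : ccGrowB m vis comp = comp.foldl (fun g c =>
      [((c.1 + 1 : Int), c.2), (c.1 - 1, c.2), (c.1, c.2 + 1), (c.1, c.2 - 1)].foldl
        (fun g n =>
          if m.contains n && !(PySem.Set.contains vis n) then PySem.Set.add g n else g) g)
      comp := by
    unfold ccGrowB
    rw [PySem.Set.ofList_eq_self_of_nodup comp hnd]
  rw [hdef]
  exact ⟨fun x => (houter.1 x), houter.2.1, houter.2.2⟩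

-- the saturation loop of B computes exactly the reachable set
theorem ccSatB_spec (pts : List (Int × Int)) (vis : PySem.Set (Int × Int))
    (c : Int × Int) :
    ∀ (fuel : Nat) (comp : PySem.Set (Int × Int)), comp.Nodup →
    (∀ x ∈ comp, (ccDictA pts).contains x = true) →
    c ∈ comp → (∀ x ∈ comp, ccReach (ccDictA pts) vis c x) →
    (ccDictA pts).size + 1 ≤ fuel + comp.length →
    ∀ x, x ∈ ccSatB (ccDictA pts) vis fuel comp ↔ ccReach (ccDictA pts) vis c x := by
  intro fuel
  induction fuel with
  | zero =>
      intro comp h1 h2 h3 h4 hF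
      exfalso
      have := ccLen_le_size pts comp h1 h2
      omega
  | succ fuel ih =>
      intro comp h1 h2 h3 h4 hF
      obtain ⟨g1, g2, g3⟩ := ccGrowB_spec (ccDictA pts) vis comp h1
      by_cases hl : (ccGrowB (ccDictA pts) vis comp).length = comp.length
      · have hgeq : ccGrowB (ccDictA pts) vis comp = comp := by
          obtain ⟨ex, hex⟩ := g2
          have hlen2 : comp.length + ex.length = comp.length := by
            rw [← List.length_append, ← hex]; exact hl
          have hex0 : ex = [] := List.length_eq_zero_iff.1 (by omega)
          rw [hex, hex0, List.append_nil]
        have hred : ccSatB (ccDictA pts) vis (fuel + 1) comp = comp := by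
          simp [ccSatB, hl]
        rw [hred]
        have hclosed : ∀ a ∈ comp, ∀ x, ccStep (ccDictA pts) vis a x → x ∈ comp := by
          intro a ha x hs
          have hx : x ∈ ccGrowB (ccDictA pts) vis comp := (g1 x).2 (Or.inr ⟨a, ha, hs⟩)
          rwa [hgeq] at hx
        intro x
        constructor
        · exact h4 x
        · intro hr
          induction hr with
          | refl => exact h3
          | tail hab hstep ihr => exact hclosed _ ihr _ hstep
      · have hred : ccSatB (ccDictA pts) vis (fuel + 1) comp =
            ccSatB (ccDictA pts) vis fuel (ccGrowB (ccDictA pts) vis comp) := by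
          simp [ccSatB, hl]
        rw [hred]
        have hggrow : comp.length + 1 ≤ (ccGrowB (ccDictA pts) vis comp).length := by
          obtain ⟨ex, hex⟩ := g2
          have hxne : ex ≠ [] := by
            intro h0; exact hl (by rw [hex, h0, List.append_nil])
          have hpos : 0 < ex.length := List.length_pos_iff.2 hxne
          rw [hex]; simp; omega
        apply ih
        · exact g3
        · intro x hx
          rcases (g1 x).1 hx with h | ⟨a, ha, hs⟩
          · exact h2 x h
          · exact hs.2.1
        · exact (g1 c).2 (Or.inl h3)
        · intro x hx
          rcases (g1 x).1 hx with h | ⟨a, ha, hs⟩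
          · exact h4 x h
          · exact (h4 a ha).tail hs
        · omega

-- the two outer folds stay in lock-step
theorem ccOuter_rel (pts : List (Int × Int)) :
    ∀ (its : List ((Int × Int) × List Int)) (visA : PySem.Set (Int × Int))
      (labA : List Int) (visB : PySem.Set (Int × Int)) (cid : Int),
    (∀ p ∈ its, (ccDictA pts).get? p.1 = some p.2) →
    (∀ x, x ∈ visA ↔ x ∈ visB) → visA.Nodup → visB.Nodup →
    (∀ x ∈ visA, (ccDictA pts).contains x = true) →
    labA.length = pts.length →
    (its.foldl (ccOuterA (ccDictA pts)) (visA, labA, cid)).2.1 =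
      ((its.map (·.1)).foldl (ccOuterB (ccDictA pts)) (labA, cid, visB)).1 ∧
    (its.foldl (ccOuterA (ccDictA pts)) (visA, labA, cid)).2.2 =
      ((its.map (·.1)).foldl (ccOuterB (ccDictA pts)) (labA, cid, visB)).2.1 := by
  intro its
  induction its with
  | nil => exact fun _ _ _ _ _ _ _ _ _ _ => ⟨rfl, rfl⟩
  | cons p its ih =>
      intro visA labA visB cid hits hrel hndA hndB hconA hlen
      obtain ⟨k, v⟩ := p
      have hk : (ccDictA pts).get? k = some v := hits (k, v) (List.mem_cons_self ..)
      have hkc : (ccDictA pts).contains k = true := by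
        rw [PySem.Dict.contains_eq_isSome_get?, hk]; rfl
      have hcc : PySem.Set.contains visA k = PySem.Set.contains visB k := by
        by_cases hm : k ∈ visA
        · rw [(PySem.Set.contains_iff _ _).2 hm, (PySem.Set.contains_iff _ _).2 ((hrel k).1 hm)]
        · have hm' : k ∉ visB := fun h => hm ((hrel k).2 h)
          have e1 : PySem.Set.contains visA k = false := by
            cases hb : PySem.Set.contains visA k
            · rfl
            · exact absurd ((PySem.Set.contains_iff _ _).1 hb) hm
          have e2 : PySem.Set.contains visB k = false := by
            cases hb : PySem.Set.contains visB k
            · rfl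
            · exact absurd ((PySem.Set.contains_iff _ _).1 hb) hm'
          rw [e1, e2]
      simp only [List.map_cons, List.foldl_cons]
      by_cases hvk : PySem.Set.contains visA k = true
      · have hmA : k ∈ visA := (PySem.Set.contains_iff _ _).1 hvk
        have hmB : k ∈ visB := (hrel k).1 hmA
        have hA : ccOuterA (ccDictA pts) (visA, labA, cid) (k, v) = (visA, labA, cid) := by
          simp [ccOuterA, hmA]
        have hB : ccOuterB (ccDictA pts) (labA, cid, visB) k = (labA, cid, visB) := by
          simp [ccOuterB, hmB]
        rw [hA, hB]
        exact ih visA labA visB cid (fun q hq => hits q (List.mem_cons_of_mem _ hq)) hrel hndA hndB hconA hlen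
      · have hkA : k ∉ visA := fun hm => hvk ((PySem.Set.contains_iff _ _).2 hm)
        have hkB : k ∉ visB := fun hm => hkA ((hrel k).2 hm)
        have hgetD : (ccDictA pts).getD k [] = v := by
          rw [PySem.Dict.getD_eq_get?_getD, hk]; rfl
        have hvkf : PySem.Set.contains visA k = false := by
          cases hb : PySem.Set.contains visA k
          · rfl
          · exact absurd hb hvk
        have hvkfB : PySem.Set.contains visB k = false := by rw [← hcc]; exact hvkf
        have hA : ccOuterA (ccDictA pts) (visA, labA, cid) (k, v) =
            ((ccDfsA (ccDictA pts) cid (5 * (ccDictA pts).size + 5)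
                (PySem.Set.add visA k, [k], ccWriteA ((ccDictA pts).getD k []) cid labA)).1,
             (ccDfsA (ccDictA pts) cid (5 * (ccDictA pts).size + 5)
                (PySem.Set.add visA k, [k], ccWriteA ((ccDictA pts).getD k []) cid labA)).2,
             cid + 1) := by
          simp [ccOuterA, hkA, ← hgetD]
        have hB : ccOuterB (ccDictA pts) (labA, cid, visB) k =
            ((ccSatB (ccDictA pts) visB (ccDictA pts).size (PySem.Set.ofList [k])).foldl
                (fun L x => ccWriteB ((ccDictA pts).getD x []) cid L) labA,
             cid + 1,
             PySem.Set.union visB (ccSatB (ccDictA pts) visB (ccDictA pts).size (PySem.Set.ofList [k]))) := by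
          simp [ccOuterB, hkB]
        have haddlen : (PySem.Set.add visA k).length = visA.length + 1 := by
          rw [PySem.Set.add_of_not_mem hkA]; simp
        have hwrite := ccWriteA_spec pts k cid labA hlen
        obtain ⟨A1, A2, A3, A4, A5⟩ :=
          ccDfsA_spec pts cid visA k labA (5 * (ccDictA pts).size + 5)
            (PySem.Set.add visA k) [k] (ccWriteA ((ccDictA pts).getD k []) cid labA)
            (PySem.Set.nodup_add _ _ hndA)
            (fun x hx => by
              rcases (PySem.Set.mem_add _ _ _).1 hx with h | h
              · exact hconA x h
              · exact h ▸ hkc)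
            (fun x hx => (PySem.Set.mem_add _ _ _).2 (Or.inl hx))
            ((PySem.Set.mem_add _ _ _).2 (Or.inr rfl))
            hkA
            (fun x hx hx0 => by
              rcases (PySem.Set.mem_add _ _ _).1 hx with h | h
              · exact absurd h hx0
              · rw [h]
                exact Relation.ReflTransGen.refl)
            (List.nodup_singleton k)
            (fun x hx => by
              have he : x = k := by simpa using hx
              exact ⟨(PySem.Set.mem_add _ _ _).2 (Or.inr he), he ▸ hkA⟩)
            (fun x hx hx0 hxs d hd hcont => by
              rcases (PySem.Set.mem_add _ _ _).1 hx with h | h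
              · exact absurd h hx0
              · exact absurd (by simp [h]) hxs)
            hwrite.1
            (fun k' hk' => by
              rw [hwrite.2 k' hk']
              by_cases he : pcd pts (k' : Int) = k
              · rw [if_pos he, if_pos ⟨(PySem.Set.mem_add _ _ _).2 (Or.inr he), he ▸ hkA⟩]
              · rw [if_neg he, if_neg (fun hh => he (((PySem.Set.mem_add _ _ _).1 hh.1).resolve_left hh.2))])
            (by simp only [haddlen, List.length_cons, List.length_nil]; omega)
        have hofl : PySem.Set.ofList [k] = [k] :=
          PySem.Set.ofList_eq_self_of_nodup _ (List.nodup_singleton k)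
        have S1 := ccSatB_spec pts visB k (ccDictA pts).size (PySem.Set.ofList [k])
          (by rw [hofl]; exact List.nodup_singleton k)
          (fun x hx => by rw [hofl] at hx; simp at hx; exact hx ▸ hkc)
          (by rw [hofl]; simp)
          (fun x hx => by
            rw [hofl] at hx
            simp at hx
            rw [hx]
            exact Relation.ReflTransGen.refl)
          (by rw [hofl]; simp)
        have hreachAB : ∀ x, ccReach (ccDictA pts) visA k x ↔ ccReach (ccDictA pts) visB k x :=
          fun x => ⟨ccReach_congr _ _ _ hrel _ _, ccReach_congr _ _ _ (fun y => (hrel y).symm) _ _⟩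
        have hrel' : ∀ x, x ∈ (ccDfsA (ccDictA pts) cid (5 * (ccDictA pts).size + 5)
            (PySem.Set.add visA k, [k], ccWriteA ((ccDictA pts).getD k []) cid labA)).1 ↔
            x ∈ PySem.Set.union visB (ccSatB (ccDictA pts) visB (ccDictA pts).size (PySem.Set.ofList [k])) := by
          intro x
          rw [A1 x, PySem.Set.mem_union _ _ _, S1 x]
          constructor
          · rintro (h | h)
            · exact Or.inl ((hrel x).1 h)
            · exact Or.inr ((hreachAB x).1 h)
          · rintro (h | h)
            · exact Or.inl ((hrel x).2 h)
            · exact Or.inr ((hreachAB x).2 h)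
        have hBfold := ccWriteB_fold_spec pts
          (ccSatB (ccDictA pts) visB (ccDictA pts).size (PySem.Set.ofList [k])) cid labA hlen
        have hcond : ∀ y, y ∈ ccSatB (ccDictA pts) visB (ccDictA pts).size (PySem.Set.ofList [k]) ↔
            (y ∈ (ccDfsA (ccDictA pts) cid (5 * (ccDictA pts).size + 5)
              (PySem.Set.add visA k, [k], ccWriteA ((ccDictA pts).getD k []) cid labA)).1 ∧ y ∉ visA) := by
          intro y
          rw [S1 y, A1 y]
          constructor
          · intro h
            have hA' := (hreachAB y).2 h
            exact ⟨Or.inr hA', ccReach_not_mem _ _ _ _ hkA hA'⟩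
          · rintro ⟨h1 | h1, h2⟩
            · exact absurd h1 h2
            · exact (hreachAB y).1 h1
        have hlabeq : (ccDfsA (ccDictA pts) cid (5 * (ccDictA pts).size + 5)
            (PySem.Set.add visA k, [k], ccWriteA ((ccDictA pts).getD k []) cid labA)).2 =
            (ccSatB (ccDictA pts) visB (ccDictA pts).size (PySem.Set.ofList [k])).foldl
              (fun L x => ccWriteB ((ccDictA pts).getD x []) cid L) labA := by
          apply List.ext_getElem (by rw [A4, hBfold.1])
          intro i hi1 hi2
          have hip : i < pts.length := by rwa [A4] at hi1
          have hgd : (ccDfsA (ccDictA pts) cid (5 * (ccDictA pts).size + 5)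
              (PySem.Set.add visA k, [k], ccWriteA ((ccDictA pts).getD k []) cid labA)).2.getD i 0 =
              ((ccSatB (ccDictA pts) visB (ccDictA pts).size (PySem.Set.ofList [k])).foldl
                (fun L x => ccWriteB ((ccDictA pts).getD x []) cid L) labA).getD i 0 := by
            rw [A5 i hip, hBfold.2 i hip]
            by_cases hcm : pcd pts (i : Int) ∈
                ccSatB (ccDictA pts) visB (ccDictA pts).size (PySem.Set.ofList [k])
            · rw [if_pos ((hcond _).1 hcm), if_pos hcm]
            · rw [if_neg (fun hh => hcm ((hcond _).2 hh)), if_neg hcm]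
          have t1 : (ccDfsA (ccDictA pts) cid (5 * (ccDictA pts).size + 5)
              (PySem.Set.add visA k, [k], ccWriteA ((ccDictA pts).getD k []) cid labA)).2.getD i 0 =
              (ccDfsA (ccDictA pts) cid (5 * (ccDictA pts).size + 5)
              (PySem.Set.add visA k, [k], ccWriteA ((ccDictA pts).getD k []) cid labA)).2[i] := by
            rw [List.getD_eq_getElem?_getD, List.getElem?_eq_getElem hi1]
            rfl
          have t2 : ((ccSatB (ccDictA pts) visB (ccDictA pts).size (PySem.Set.ofList [k])).foldl
                (fun L x => ccWriteB ((ccDictA pts).getD x []) cid L) labA).getD i 0 =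
              ((ccSatB (ccDictA pts) visB (ccDictA pts).size (PySem.Set.ofList [k])).foldl
                (fun L x => ccWriteB ((ccDictA pts).getD x []) cid L) labA)[i] := by
            rw [List.getD_eq_getElem?_getD, List.getElem?_eq_getElem hi2]
            rfl
          rw [← t1, ← t2, hgd]
        rw [hA, hB, ← hlabeq]
        exact ih _ _ _ _ (fun q hq => hits q (List.mem_cons_of_mem _ hq)) hrel' A2
          (PySem.Set.nodup_union _ _ hndB) A3 A4

-- ===== VERDICT (by name: the statement is the Claim_ definition above) =====
theorem connected_cluster_spec : Claim_equal_connected_cluster := by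
  intro pts _
  show (connected_cluster pts) = connected_cluster_alt pts
  have hrel := ccOuter_rel pts (ccDictA pts).items PySem.Set.empty
    (List.replicate pts.length (-1)) PySem.Set.empty 0
    (fun p hp => by
      have := PySem.Dict.get?_of_mem_items (d := ccDictA pts) (k := p.1) (v := p.2)
        (by simpa using hp) (ccDictA_keys_nodup pts)
      exact this)
    (fun x => Iff.rfl) (List.nodup_nil) (List.nodup_nil)
    (fun x hx => absurd hx (List.not_mem_nil))
    (by simp)
  have hk : (ccDictA pts).keys = (ccDictA pts).items.map (·.1) := rfl
  simp only [connected_cluster, connected_cluster_alt, ccDictB_eq, hk]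
  exact Prod.ext hrel.1 hrel.2
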